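-- pv_equiv track=rewrite | github.com/awkx93/bursdaily-telegram-bot | screener/scorer.py | _detect_catalyst
-- ===== SOURCE A (Python) =====
-- def _detect_catalyst(stock: dict, announcements: list[dict]) -> tuple[str, int]:
--     """Return (catalyst description, points) from Bursa announcements."""
--     name_lower = stock.get("name", "").lower()
--     code = stock.get("code", "").upper()
--
--     very_high = ["contract", "job award", "privatis", "acquisition", "merger", "takeover"]
--     high = ["profit", "earnings", "revenue", "upgrade", "record", "beat"]
--     medium = ["buyback", "bonus issue", "rights issue", "dividend", "placement"]
--
--     for ann in announcements:
--         company = ann.get("company", "").lower()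
--         subject = ann.get("subject", "").lower()
--
--         if code.lower() not in company and name_lower[:6] not in company:
--             continue
--
--         for kw in very_high:
--             if kw in subject:
--                 return f"Bursa: {ann['subject'][:60]}", 15
--         for kw in high:
--             if kw in subject:
--                 return f"Bursa: {ann['subject'][:60]}", 10
--         for kw in medium:
--             if kw in subject:
--                 return f"Bursa: {ann['subject'][:60]}", 6
--
--     return "", 0
-- ===== SOURCE B (Python) =====
-- def _detect_catalyst(stock: dict, announcements: list[dict]) -> tuple[str, int]:
--     """Return (catalyst description, points) from Bursa announcements."""
--     name_prefix = stock.get("name", "").lower()[:6]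
--     code_lower = stock.get("code", "").upper().lower()
--
--     points = {
--         "contract": 15, "job award": 15, "privatis": 15,
--         "acquisition": 15, "merger": 15, "takeover": 15,
--         "profit": 10, "earnings": 10, "revenue": 10,
--         "upgrade": 10, "record": 10, "beat": 10,
--         "buyback": 6, "bonus issue": 6, "rights issue": 6,
--         "dividend": 6, "placement": 6,
--     }
--
--     for ann in announcements:
--         company = ann.get("company", "").lower()
--         if code_lower not in company and name_prefix not in company:
--             continue
--         subject = ann.get("subject", "").lower()
--         best = 0
--         for kw, pts in points.items():
--             if kw in subject and pts > best:
--                 best = pts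
--         if best:
--             return f"Bursa: {ann['subject'][:60]}", best
--     return "", 0
-- ===== Notes on version B (the rewrite author's own statement) =====
-- stated objective: simpler
-- what changed: Replaces the three ordered keyword-tier loops with ordered early returns by a single running-maximum pass over one merged keyword-to-points table per announcement (equivalent because tier points are distinct and the returned description never depends on which keyword matched).
import Mathlib
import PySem

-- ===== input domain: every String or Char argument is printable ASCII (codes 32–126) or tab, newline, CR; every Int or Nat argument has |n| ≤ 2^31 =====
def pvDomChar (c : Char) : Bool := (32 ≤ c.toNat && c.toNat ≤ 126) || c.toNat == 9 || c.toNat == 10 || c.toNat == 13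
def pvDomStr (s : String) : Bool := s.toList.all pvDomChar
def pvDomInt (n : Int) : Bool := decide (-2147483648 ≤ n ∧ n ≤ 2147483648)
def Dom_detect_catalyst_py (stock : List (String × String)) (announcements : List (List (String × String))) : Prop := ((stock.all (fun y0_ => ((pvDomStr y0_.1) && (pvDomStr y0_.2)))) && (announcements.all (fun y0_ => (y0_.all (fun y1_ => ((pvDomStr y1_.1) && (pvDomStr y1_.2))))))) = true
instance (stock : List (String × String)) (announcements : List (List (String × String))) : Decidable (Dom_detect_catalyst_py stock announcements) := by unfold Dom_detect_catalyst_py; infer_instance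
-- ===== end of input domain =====

-- B replaces A's three ordered keyword-tier loops (early return per tier) by one
-- running-maximum pass over a single merged keyword→points table; objective: simpler.
-- In both ports, Python's `ann['subject']` in the return f-string is ported as
-- `getD ann "subject" ""`: it is exact, because that expression is only reached when a
-- nonempty keyword occurs in the lowered subject, which forces the key to be present.

-- ===== PORT A =====
def pvA_veryHigh : List String := ["contract", "job award", "privatis", "acquisition", "merger", "takeover"]
def pvA_high : List String := ["profit", "earnings", "revenue", "upgrade", "record", "beat"]
def pvA_medium : List String := ["buyback", "bonus issue", "rights issue", "dividend", "placement"]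

-- `for kw in tier: if kw in subject: return (desc, p)`: the returned pair does not
-- depend on which kw hit, so the early-return scan is exactly `tier.any`.
def pvA_loop (codeLower namePrefix : String) : List (List (String × String)) → String × Int
  | [] => ("", 0)
  | ann :: rest =>
    let d := PySem.Dict.mk ann
    let company := PySem.Str.lower (d.getD "company" "")
    let subject := PySem.Str.lower (d.getD "subject" "")
    if !(PySem.Str.isIn codeLower company) && !(PySem.Str.isIn namePrefix company) then
      pvA_loop codeLower namePrefix rest
    else if pvA_veryHigh.any (fun kw => PySem.Str.isIn kw subject) then
      ("Bursa: " ++ PySem.Str.slice (d.getD "subject" "") none (some 60), 15)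
    else if pvA_high.any (fun kw => PySem.Str.isIn kw subject) then
      ("Bursa: " ++ PySem.Str.slice (d.getD "subject" "") none (some 60), 10)
    else if pvA_medium.any (fun kw => PySem.Str.isIn kw subject) then
      ("Bursa: " ++ PySem.Str.slice (d.getD "subject" "") none (some 60), 6)
    else
      pvA_loop codeLower namePrefix rest

def detect_catalyst_py (stock : List (String × String)) (announcements : List (List (String × String))) : String × Int :=
  let sd := PySem.Dict.mk stock
  let name_lower := PySem.Str.lower (sd.getD "name" "")
  let code := PySem.Str.upper (sd.getD "code" "")
  pvA_loop (PySem.Str.lower code) (PySem.Str.slice name_lower none (some 6)) announcements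

-- ===== PORT B =====
def pvB_kwPoints : List (String × Int) :=
  [("contract", 15), ("job award", 15), ("privatis", 15),
   ("acquisition", 15), ("merger", 15), ("takeover", 15),
   ("profit", 10), ("earnings", 10), ("revenue", 10),
   ("upgrade", 10), ("record", 10), ("beat", 10),
   ("buyback", 6), ("bonus issue", 6), ("rights issue", 6),
   ("dividend", 6), ("placement", 6)]

-- `best = 0; for kw, pts in points.items(): if kw in subject and pts > best: best = pts`
def pvB_best (subject : String) : Int :=
  pvB_kwPoints.foldl (fun best kp => if PySem.Str.isIn kp.1 subject && best < kp.2 then kp.2 else best) 0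

def pvB_loop (codeLower namePrefix : String) : List (List (String × String)) → String × Int
  | [] => ("", 0)
  | ann :: rest =>
    let d := PySem.Dict.mk ann
    let company := PySem.Str.lower (d.getD "company" "")
    if !(PySem.Str.isIn codeLower company) && !(PySem.Str.isIn namePrefix company) then
      pvB_loop codeLower namePrefix rest
    else
      let subject := PySem.Str.lower (d.getD "subject" "")
      let best := pvB_best subject
      if best ≠ 0 then
        ("Bursa: " ++ PySem.Str.slice (d.getD "subject" "") none (some 60), best)
      else
        pvB_loop codeLower namePrefix rest

def detect_catalyst_py_alt (stock : List (String × String)) (announcements : List (List (String × String))) : String × Int :=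
  let sd := PySem.Dict.mk stock
  let namePrefix := PySem.Str.slice (PySem.Str.lower (sd.getD "name" "")) none (some 6)
  let codeLower := PySem.Str.lower (PySem.Str.upper (sd.getD "code" ""))
  pvB_loop codeLower namePrefix announcements

-- ===== PRECONDITION & SPEC =====
def Spec_detect_catalyst_py (stock : List (String × String)) (announcements : List (List (String × String))) (out : String × Int) : Prop := out = detect_catalyst_py_alt stock announcements
instance (stock : List (String × String)) (announcements : List (List (String × String))) (out : String × Int) : Decidable (Spec_detect_catalyst_py stock announcements out) := by unfold Spec_detect_catalyst_py; infer_instance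

-- ===== CLAIM (what is proved, stated in full; the proofs are below) =====
def Claim_equal_detect_catalyst_py : Prop := ∀ (stock : List (String × String)) (announcements : List (List (String × String))), Dom_detect_catalyst_py stock announcements → Spec_detect_catalyst_py stock announcements (detect_catalyst_py stock announcements)

-- ===== LEMMAS AND PROOFS =====

-- One tier with constant points c: the running max over it raises `init` to c
-- exactly when some keyword of the tier occurs in the subject.
theorem pvB_fold_const_tier (kws : List String) (c : Int) (s : String) (init : Int) :
    (kws.map (fun k => (k, c))).foldl
      (fun best kp => if PySem.Str.isIn kp.1 s && best < kp.2 then kp.2 else best) init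
    = if kws.any (fun kw => PySem.Str.isIn kw s) && init < c then c else init := by
  induction kws generalizing init with
  | nil => simp
  | cons k t ih =>
    simp only [List.map_cons, List.foldl_cons, List.any_cons]
    rw [ih]
    simp only [Bool.and_eq_true, Bool.or_eq_true, decide_eq_true_eq]
    split_ifs <;> first | rfl | omega | tauto

theorem pvB_kwPoints_eq :
    pvB_kwPoints = pvA_veryHigh.map (fun k => (k, (15 : Int)))
      ++ pvA_high.map (fun k => (k, (10 : Int)))
      ++ pvA_medium.map (fun k => (k, (6 : Int))) := rfl

-- The merged running max equals A's tiered early-return value.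
theorem pvB_best_eq_tier (s : String) :
    pvB_best s =
      if pvA_veryHigh.any (fun kw => PySem.Str.isIn kw s) then 15
      else if pvA_high.any (fun kw => PySem.Str.isIn kw s) then 10
      else if pvA_medium.any (fun kw => PySem.Str.isIn kw s) then 6
      else 0 := by
  unfold pvB_best
  rw [pvB_kwPoints_eq, List.foldl_append, List.foldl_append,
      pvB_fold_const_tier, pvB_fold_const_tier, pvB_fold_const_tier]
  cases h1 : pvA_veryHigh.any (fun kw => PySem.Str.isIn kw s) <;>
    cases h2 : pvA_high.any (fun kw => PySem.Str.isIn kw s) <;>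
      cases h3 : pvA_medium.any (fun kw => PySem.Str.isIn kw s) <;>
        (try simp only [h1, h2, h3]) <;> decide

theorem pvLoop_eq (codeLower namePrefix : String) (anns : List (List (String × String))) :
    pvA_loop codeLower namePrefix anns = pvB_loop codeLower namePrefix anns := by
  induction anns with
  | nil => rfl
  | cons ann rest ih =>
    unfold pvA_loop pvB_loop
    simp only [pvB_best_eq_tier]
    by_cases hc : (!(PySem.Str.isIn codeLower (PySem.Str.lower ((PySem.Dict.mk ann).getD "company" ""))) &&
        !(PySem.Str.isIn namePrefix (PySem.Str.lower ((PySem.Dict.mk ann).getD "company" "")))) = true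
    · rw [if_pos hc, if_pos hc]; exact ih
    · cases h1 : pvA_veryHigh.any (fun kw => PySem.Str.isIn kw (PySem.Str.lower ((PySem.Dict.mk ann).getD "subject" ""))) <;>
        cases h2 : pvA_high.any (fun kw => PySem.Str.isIn kw (PySem.Str.lower ((PySem.Dict.mk ann).getD "subject" ""))) <;>
          cases h3 : pvA_medium.any (fun kw => PySem.Str.isIn kw (PySem.Str.lower ((PySem.Dict.mk ann).getD "subject" ""))) <;>
          (try simp only [h1, h2, h3]) <;>
            norm_num [ih] <;>
              (intro ha hb; exact absurd (by simp [ha, hb]) hc)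

-- ===== VERDICT (by name: the statement is the Claim_ definition above) =====
theorem detect_catalyst_py_spec : Claim_equal_detect_catalyst_py := by
  intro stock announcements _
  unfold Spec_detect_catalyst_py detect_catalyst_py detect_catalyst_py_alt
  exact pvLoop_eq _ _ announcements
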